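-- pv_equiv track=rewrite | github.com/harashish-arora/glass-onion | baselines/regime-i/solubnet_baseline.py | create_mini_batches
-- ===== SOURCE A (Python) =====
-- def create_mini_batches(num_samples, batch_size):
--     """Create mini-batch indices."""
--     if batch_size >= num_samples:
--         return [[0, num_samples]]
--
--     batch_idx = [[i * batch_size, (i + 1) * batch_size]
--                  for i in range(num_samples // batch_size)]
--
--     if batch_idx[-1][1] != num_samples:
--         batch_idx.append([batch_idx[-1][1], num_samples])
--
--     return batch_idx
-- ===== SOURCE B (Python) =====
-- def create_mini_batches(num_samples, batch_size):
--     """Create mini-batch indices."""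
--     if batch_size >= num_samples:
--         return [[0, num_samples]]
--     batches = []
--     start = 0
--     while start < num_samples:
--         end = min(start + batch_size, num_samples)
--         batches.append([start, end])
--         start = end
--     return batches
-- ===== Notes on version B (the rewrite author's own statement) =====
-- stated objective: simpler
-- what changed: B replaces A's floor-division comprehension over batch indices plus a special-case remainder append by a single accumulating while-loop that walks a start cursor and clamps each end with min, so the remainder batch falls out of the uniform pass.
import Mathlib
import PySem

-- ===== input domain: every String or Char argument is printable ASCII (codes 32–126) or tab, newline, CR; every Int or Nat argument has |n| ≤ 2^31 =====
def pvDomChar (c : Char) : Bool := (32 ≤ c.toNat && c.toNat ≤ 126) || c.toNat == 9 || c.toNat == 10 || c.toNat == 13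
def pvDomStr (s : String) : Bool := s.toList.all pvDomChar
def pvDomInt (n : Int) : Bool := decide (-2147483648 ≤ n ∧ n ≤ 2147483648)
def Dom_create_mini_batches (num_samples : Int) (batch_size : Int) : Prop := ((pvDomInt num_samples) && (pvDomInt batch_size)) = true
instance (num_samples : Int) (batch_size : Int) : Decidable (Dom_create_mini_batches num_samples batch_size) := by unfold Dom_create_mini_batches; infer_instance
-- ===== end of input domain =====

-- B walks a start cursor in one accumulating while-loop, clamping each batch end with min,
-- instead of A's floor-division comprehension plus a special-case remainder append; same cost,
-- a simpler decomposition.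

-- ===== PORT A =====
def create_mini_batches (num_samples : Int) (batch_size : Int) : List (List Int) :=
  if batch_size ≥ num_samples then [[0, num_samples]]
  else
    let batch_idx :=
      (PySem.List.pyRange 0 (PySem.Int.floordiv num_samples batch_size) 1).map
        (fun i => [i * batch_size, (i + 1) * batch_size])
    -- batch_idx[-1][1]: IndexError exactly when batch_idx = [], which Pre_ excludes
    let last := PySem.List.pyGetD (PySem.List.pyGetD batch_idx (-1) []) 1 0
    if last ≠ num_samples then batch_idx ++ [[last, num_samples]] else batch_idx

-- ===== PORT B =====
-- the while-loop of Source B; the extra '0 < bs' in the guard only makes the recursion total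
-- (the Python loop diverges there, and Pre_ excludes those inputs)
def pvAltLoop (ns bs : Int) (acc : List (List Int)) (start : Int) : List (List Int) :=
  if _h : start < ns ∧ 0 < bs then
    pvAltLoop ns bs (acc ++ [[start, min (start + bs) ns]]) (min (start + bs) ns)
  else acc
termination_by (ns - start).toNat
decreasing_by omega

def create_mini_batches_alt (num_samples : Int) (batch_size : Int) : List (List Int) :=
  if batch_size ≥ num_samples then [[0, num_samples]]
  else pvAltLoop num_samples batch_size [] 0

-- ===== PRECONDITION & SPEC =====
-- Pre_ is exactly where Python A returns: with batch_size ≤ 0 and batch_size < num_samples,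
-- A raises (ZeroDivisionError at batch_size = 0, otherwise IndexError on batch_idx[-1]).
def Pre_create_mini_batches (num_samples : Int) (batch_size : Int) : Prop :=
  batch_size ≥ num_samples ∨ 0 < batch_size
instance (num_samples : Int) (batch_size : Int) : Decidable (Pre_create_mini_batches num_samples batch_size) := by unfold Pre_create_mini_batches; infer_instance
def pvWitness_create_mini_batches : Int × Int := (7, 3)

def Spec_create_mini_batches (num_samples : Int) (batch_size : Int) (out : List (List Int)) : Prop := out = create_mini_batches_alt num_samples batch_size
instance (num_samples : Int) (batch_size : Int) (out : List (List Int)) : Decidable (Spec_create_mini_batches num_samples batch_size out) := by unfold Spec_create_mini_batches; infer_instance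

-- ===== CLAIM (what is proved, stated in full; the proofs are below) =====
def Claim_equal_create_mini_batches : Prop := ∀ (num_samples : Int) (batch_size : Int), Dom_create_mini_batches num_samples batch_size → Pre_create_mini_batches num_samples batch_size → Spec_create_mini_batches num_samples batch_size (create_mini_batches num_samples batch_size)

-- ===== LEMMAS AND PROOFS =====

-- The loop started at j*bs (j ≤ q := ns // bs) appends the uniform segments for k = j…q-1
-- and, if bs does not divide ns, the clamped remainder segment [q*bs, ns].
lemma pvAltLoop_spec (ns bs : Int) (hb : 0 < bs) (q : Nat)
    (h1 : (q : Int) * bs ≤ ns) (h2 : ns < ((q : Int) + 1) * bs) :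
    ∀ (d j : Nat) (acc : List (List Int)), j + d = q →
      pvAltLoop ns bs acc ((j : Int) * bs)
        = acc ++ ((List.range' j d).map (fun (k : Nat) => [(k : Int) * bs, ((k : Int) + 1) * bs])
            ++ (if (q : Int) * bs = ns then [] else [[(q : Int) * bs, ns]])) := by
  intro d
  induction d with
  | zero =>
    intro j acc hj
    have hjq : q = j := by omega
    subst hjq
    by_cases he : (q : Int) * bs = ns
    · rw [pvAltLoop, dif_neg (by rintro ⟨hc, -⟩; rw [he] at hc; exact lt_irrefl _ hc)]
      simp [he]
    · have hlt : (q : Int) * bs < ns := lt_of_le_of_ne h1 he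
      have hmin : min ((q : Int) * bs + bs) ns = ns := by
        have : ns ≤ (q : Int) * bs + bs := by nlinarith [h2]
        omega
      rw [pvAltLoop, dif_pos ⟨hlt, hb⟩, hmin, pvAltLoop,
        dif_neg (by rintro ⟨hc, -⟩; exact lt_irrefl _ hc)]
      simp [he]
  | succ d ih =>
    intro j acc hj
    have hjq : j < q := by omega
    have hstep : ((j : Int) + 1) * bs ≤ (q : Int) * bs := by
      have : (j : Int) + 1 ≤ (q : Int) := by exact_mod_cast hjq
      nlinarith
    have hlt : (j : Int) * bs < ns := by nlinarith
    have hmin : min ((j : Int) * bs + bs) ns = ((j : Int) + 1) * bs := by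
      have : ((j : Int) + 1) * bs = (j : Int) * bs + bs := by ring
      omega
    rw [pvAltLoop, dif_pos ⟨hlt, hb⟩, hmin]
    have hcast : ((j : Int) + 1) = ((j + 1 : Nat) : Int) := by push_cast; ring
    rw [hcast, ih (j + 1) _ (by omega)]
    rw [List.range'_succ, List.map_cons, ← hcast]
    simp

-- ===== VERDICT (by name: the statement is the Claim_ definition above) =====
theorem create_mini_batches_spec : Claim_equal_create_mini_batches := by
  intro ns bs _ hpre
  unfold Spec_create_mini_batches create_mini_batches create_mini_batches_alt
  by_cases hg : bs ≥ ns
  · simp [hg]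
  · have hb : 0 < bs := hpre.resolve_left hg
    have hlt : bs < ns := by omega
    simp only [if_neg hg]
    rw [PySem.Int.floordiv_eq_ediv_of_pos hb]
    set q : Int := ns / bs with hqdef
    have hq1 : 1 ≤ q := by rw [hqdef, Int.le_ediv_iff_mul_le hb]; omega
    have hed := Int.mul_ediv_add_emod ns bs
    have hr0 : 0 ≤ ns % bs := Int.emod_nonneg ns (by omega)
    have hrlt : ns % bs < bs := Int.emod_lt_of_pos ns hb
    have hqn : ((q.toNat : Int)) = q := Int.toNat_of_nonneg (by omega)
    -- B side via the loop lemma at j = 0, d = q.toNat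
    have h1 : (q.toNat : Int) * bs ≤ ns := by rw [hqn]; nlinarith
    have h2 : ns < ((q.toNat : Int) + 1) * bs := by rw [hqn]; nlinarith
    have hB := pvAltLoop_spec ns bs hb q.toNat h1 h2 q.toNat 0 [] (by omega)
    simp only [Nat.cast_zero, zero_mul, List.nil_append] at hB
    rw [hB]
    -- A side: rewrite the comprehension and compute batch_idx[-1][1]
    rw [PySem.List.pyRange_zero, List.map_map]
    simp only [Function.comp_def]
    obtain ⟨m, hm⟩ : ∃ m, q.toNat = m + 1 := ⟨q.toNat - 1, by omega⟩
    have hmq : ((m : Int) + 1) = (q.toNat : Int) := by omega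
    have hsplit : (List.range q.toNat).map (fun (k : Nat) => [(k : Int) * bs, ((k : Int) + 1) * bs])
        = (List.range m).map (fun (k : Nat) => [(k : Int) * bs, ((k : Int) + 1) * bs])
          ++ [[(m : Int) * bs, ((m : Int) + 1) * bs]] := by
      rw [hm, List.range_succ, List.map_append]; simp
    rw [hsplit, PySem.List.pyGetD_neg_one_append_singleton]
    simp only [PySem.List.pyGetD_ofNat', List.getD, List.getElem?_cons_succ,
      List.getElem?_cons_zero, Option.getD_some]
    rw [← hsplit, List.range_eq_range']
    by_cases he : ((m : Int) + 1) * bs = ns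
    · rw [if_neg (by simpa using he)]
      rw [if_pos (by rw [← hmq]; exact he)]
      simp
    · rw [if_pos (by simpa using he)]
      rw [if_neg (by rw [← hmq]; exact he)]
      rw [hmq]
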